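-- pv_equiv track=rewrite | github.com/JaiderLopez/One-day-One-code-practices | 2024/december/(10) look and say.py | look_and_say_and_sum
-- ===== SOURCE A (Python) =====
-- def look_and_say_and_sum(n: int) -> int:
--    if not 1 <= n <= 55:
--       return 0  # return 0 if out of the range
--
--    def separate(sequence: str) -> list:
--       groups = []
--       current_group = [sequence[0]]
--
--       for char in sequence[1:]:
--          if char == current_group[-1]:
--                current_group.append(char)
--          else:
--                groups.append(current_group)
--                current_group = [char]
--
--       groups.append(current_group)
--       return groups
--
--    def count(groups: list) -> str:
--       return ''.join(f"{len(group)}{group[0]}" for group in groups)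
--
--    def suma_total(sequence: str) -> int:
--       return sum(map(int, sequence))
--
--    sequence = "1"
--
--    for _ in range(1, n):
--       groups = separate(sequence)
--       sequence = count(groups)
--
--    return suma_total(sequence)
-- ===== SOURCE B (Python) =====
-- def look_and_say_and_sum(n: int) -> int:
--     if not 1 <= n <= 55:
--         return 0
--     # keep the term as run-length pairs [digit, count]; the term string is never built
--     runs = [["1", 1]]
--     for _ in range(1, n):
--         new = []
--         for d, c in runs:
--             for ch in str(c) + d:
--                 if new and new[-1][0] == ch:
--                     new[-1][1] += 1
--                 else:
--                     new.append([ch, 1])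
--         runs = new
--     return sum(int(d) * c for d, c in runs)
-- ===== Notes on version B (the rewrite author's own statement) =====
-- stated objective: alternative
-- what changed: The term is represented as run-length pairs (digit,count) throughout instead of a string: each step streams the chars 'str(count)+digit' of every run and merges them into the next pair list in one fused pass (no string term, no list of group-lists, no separate/count phases), and the final answer is the weighted sum of digit*count over the pairs instead of a per-character digit sum.
import Mathlib
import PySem

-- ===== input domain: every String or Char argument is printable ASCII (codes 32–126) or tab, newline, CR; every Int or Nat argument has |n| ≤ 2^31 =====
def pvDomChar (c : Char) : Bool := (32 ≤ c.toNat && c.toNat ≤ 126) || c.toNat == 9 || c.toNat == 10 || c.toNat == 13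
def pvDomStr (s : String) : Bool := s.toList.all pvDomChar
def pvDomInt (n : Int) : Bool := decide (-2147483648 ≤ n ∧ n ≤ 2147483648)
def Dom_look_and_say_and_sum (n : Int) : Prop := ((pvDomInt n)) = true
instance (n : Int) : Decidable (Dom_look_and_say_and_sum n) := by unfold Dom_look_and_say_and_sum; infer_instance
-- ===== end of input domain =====

-- B keeps the term as run-length pairs (digit,count) instead of a string and sums digit*count
-- at the end; return values agree with A for every n (alternative representation, not faster).

-- ===== PORT A =====

-- the loop of `separate`: state (groups, current_group); compares with current_group[-1]
-- (current_group is never empty, so getLastD is exact for Python's [-1])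
def pvSepGo : List Char → List (List Char) → List Char → (List (List Char) × List Char)
  | [], gs, cur => (gs, cur)
  | ch :: rest, gs, cur =>
      if ch == cur.getLastD ' ' then pvSepGo rest gs (cur ++ [ch])
      else pvSepGo rest (gs ++ [cur]) [ch]

-- `separate`; only ever called on nonempty sequences (Python indexes sequence[0])
def pvSeparate (s : List Char) : List (List Char) :=
  match s with
  | [] => []
  | c :: rest =>
      let p := pvSepGo rest [] [c]
      p.1 ++ [p.2]

-- f"{len(group)}{group[0]}"; groups are nonempty, so headD is exact for Python's group[0]
def pvCountGroup (g : List Char) : List Char :=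
  PySem.Int.toChars (g.length : Int) ++ [g.headD ' ']

-- `count`
def pvCount (gs : List (List Char)) : List Char := (gs.map pvCountGroup).flatten

-- `suma_total`: sum(map(int, sequence)); int(c) for a digit char c is c.toNat - 48 (exact there)
def pvSumaTotal (s : List Char) : Int := s.foldl (fun acc c => acc + ((c.toNat : Int) - 48)) 0

-- the for _ in range(1, n) loop, k = n - 1 iterations
def pvLoopA : Nat → List Char → List Char
  | 0, s => s
  | k + 1, s => pvLoopA k (pvCount (pvSeparate s))

def look_and_say_and_sum (n : Int) : Int :=
  if 1 ≤ n ∧ n ≤ 55 then pvSumaTotal (pvLoopA (n - 1).toNat ['1']) else 0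

-- ===== PORT B =====

-- the inner merge: `if new and new[-1][0] == ch: new[-1][1] += 1 else: new.append([ch, 1])`;
-- Python's `new` (O(1) append at end, O(1) access to new[-1]) is kept REVERSED here, so
-- new[-1] is the head and append is cons; pvStepB reverses once at the end of the pass
def pvPush (acc : List (Char × Int)) (ch : Char) : List (Char × Int) :=
  match acc with
  | (d, c) :: rest => if d == ch then (d, c + 1) :: rest else (ch, 1) :: (d, c) :: rest
  | [] => [(ch, 1)]

-- one step of B: stream the chars of str(c)+d of every run into the new pair list
def pvStepB (runs : List (Char × Int)) : List (Char × Int) :=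
  (runs.foldl (fun acc p => (PySem.Int.toChars p.2 ++ [p.1]).foldl pvPush acc) []).reverse

-- the for _ in range(1, n) loop of B
def pvLoopB : Nat → List (Char × Int) → List (Char × Int)
  | 0, r => r
  | k + 1, r => pvLoopB k (pvStepB r)

-- sum(int(d) * c for d, c in runs)
def pvWSum (runs : List (Char × Int)) : Int :=
  runs.foldl (fun s p => s + ((p.1.toNat : Int) - 48) * p.2) 0

def look_and_say_and_sum_alt (n : Int) : Int :=
  if 1 ≤ n ∧ n ≤ 55 then pvWSum (pvLoopB (n - 1).toNat [('1', 1)]) else 0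

-- ===== PRECONDITION & SPEC =====
def Spec_look_and_say_and_sum (n : Int) (out : Int) : Prop := out = look_and_say_and_sum_alt n
instance (n : Int) (out : Int) : Decidable (Spec_look_and_say_and_sum n out) := by unfold Spec_look_and_say_and_sum; infer_instance

-- ===== CLAIM (what is proved, stated in full; the proofs are below) =====
def Claim_equal_look_and_say_and_sum : Prop := ∀ (n : Int), Dom_look_and_say_and_sum n → Spec_look_and_say_and_sum n (look_and_say_and_sum n)

-- ===== LEMMAS AND PROOFS =====

-- canonical run-length encoding used only by the proofs
def pvMerge (d : Char) (c : Int) : List Char → List (Char × Int)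
  | [] => [(d, c)]
  | x :: t => if x = d then pvMerge d (c + 1) t else (d, c) :: pvMerge x 1 t

def pvRLE : List Char → List (Char × Int)
  | [] => []
  | c :: t => pvMerge c 1 t

def pvExpand (runs : List (Char × Int)) : List Char :=
  (runs.map (fun p => PySem.Int.toChars p.2 ++ [p.1])).flatten

def pvDigitSum (s : List Char) : Int := (s.map (fun c => (c.toNat : Int) - 48)).sum

theorem pv_getLastD_rep (m : Nat) (c : Char) (d : Char) :
    (c :: List.replicate m c).getLastD d = c := by
  induction m with
  | zero => rfl
  | succ k ih =>
      rw [List.replicate_succ]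
      simpa [List.getLastD_cons] using ih

theorem pvCount_append (gs : List (List Char)) (g : List Char) :
    pvCount (gs ++ [g]) = pvCount gs ++ pvCountGroup g := by
  simp [pvCount]

-- A's fold state (gs, c::replicate m c) corresponds to the canonical run (c, m+1)
theorem pv_mainA (rest : List Char) : ∀ (gs : List (List Char)) (m : Nat) (c : Char),
    pvCount ((pvSepGo rest gs (c :: List.replicate m c)).1 ++
             [(pvSepGo rest gs (c :: List.replicate m c)).2]) =
    pvCount gs ++ pvExpand (pvMerge c ((m : Int) + 1) rest) := by
  induction rest with
  | nil =>
      intro gs m c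
      simp [pvSepGo, pvMerge, pvExpand, pvCount_append, pvCountGroup]
  | cons ch rest ih =>
      intro gs m c
      by_cases h : ch = c
      · subst h
        have hrep : (ch :: List.replicate m ch) ++ [ch] = ch :: List.replicate (m + 1) ch := by
          simp [List.replicate_succ' (n := m)]
        simp only [pvSepGo, pvMerge, pv_getLastD_rep, beq_self_eq_true, if_true, hrep]
        have := ih gs (m + 1) ch
        rw [this]
        norm_num
      · have hb : (ch == c) = false := by simp [h]
        simp only [pvSepGo, pvMerge, pv_getLastD_rep, hb, Bool.false_eq_true, if_false, h]
        have : ([ch] : List Char) = ch :: List.replicate 0 ch := rfl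
        rw [this, ih (gs ++ [c :: List.replicate m c]) 0 ch]
        simp [pvCount_append, pvCountGroup, pvExpand]

-- A's step computes the expansion of the canonical RLE of s
theorem pv_stepA (s : List Char) (h : s ≠ []) :
    pvCount (pvSeparate s) = pvExpand (pvRLE s) := by
  cases s with
  | nil => exact absurd rfl h
  | cons c rest =>
      have := pv_mainA rest [] 0 c
      simpa [pvSeparate, pvRLE, pvCount] using this

-- B's inner fold, begun on a (reversed) state headed by (d, c), computes pvMerge d c reversed
theorem pv_push_foldl (t : List Char) : ∀ (front : List (Char × Int)) (d : Char) (c : Int),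
    t.foldl pvPush ((d, c) :: front) = (pvMerge d c t).reverse ++ front := by
  induction t with
  | nil => intro front d c; rfl
  | cons x t ih =>
      intro front d c
      by_cases h : x = d
      · subst h
        simp only [List.foldl_cons, pvPush, beq_self_eq_true, if_true, pvMerge, ih]
      · have hb : (d == x) = false := by simp [Ne.symm h]
        simp only [List.foldl_cons, pvPush, hb, Bool.false_eq_true, if_false, pvMerge, h]
        rw [ih ((d, c) :: front) x 1]
        simp

theorem pv_fold_rle (u : List Char) : (u.foldl pvPush []).reverse = pvRLE u := by
  cases u with
  | nil => rfl
  | cons c t =>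
      have h1 : pvPush [] c = [(c, 1)] := rfl
      simp only [List.foldl_cons, h1, pvRLE]
      simpa using congrArg List.reverse (pv_push_foldl t [] c 1)

-- B's step is the canonical RLE of the expansion
theorem pv_stepB (runs : List (Char × Int)) : pvStepB runs = pvRLE (pvExpand runs) := by
  rw [← pv_fold_rle]
  simp [pvStepB, pvExpand, List.foldl_flatten, List.foldl_map]

theorem pvMerge_ne_nil (t : List Char) : ∀ (d : Char) (c : Int), pvMerge d c t ≠ [] := by
  induction t with
  | nil => intro d c; simp [pvMerge]
  | cons x t ih => intro d c; simp only [pvMerge]; split <;> simp [ih]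

theorem pvExpand_rle_ne_nil (s : List Char) (h : s ≠ []) : pvExpand (pvRLE s) ≠ [] := by
  cases s with
  | nil => exact absurd rfl h
  | cons c t =>
      simp only [pvRLE]
      cases hm : pvMerge c 1 t with
      | nil => exact absurd hm (pvMerge_ne_nil t c 1)
      | cons p r => simp [pvExpand]

-- loop correspondence: B's pair state stays the canonical RLE of A's string
theorem pv_loop (k : Nat) : ∀ (s : List Char), s ≠ [] →
    pvLoopB k (pvRLE s) = pvRLE (pvLoopA k s) := by
  induction k with
  | zero => intro s _; rfl
  | succ j ih =>
      intro s hs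
      have hne : pvCount (pvSeparate s) ≠ [] := by
        rw [pv_stepA s hs]; exact pvExpand_rle_ne_nil s hs
      simp only [pvLoopA, pvLoopB, pv_stepB]
      rw [← pv_stepA s hs]
      exact ih _ hne

-- weighted sum over a canonical run list equals the digit sum of the string
theorem pv_wsum_merge (t : List Char) : ∀ (d : Char) (c : Int),
    ((pvMerge d c t).map (fun p => ((p.1.toNat : Int) - 48) * p.2)).sum =
      ((d.toNat : Int) - 48) * c + pvDigitSum t := by
  induction t with
  | nil => intro d c; simp [pvMerge, pvDigitSum]
  | cons x t ih =>
      intro d c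
      by_cases h : x = d
      · subst h
        simp only [pvMerge, if_true, ih, pvDigitSum, List.map_cons, List.sum_cons]
        ring
      · simp only [pvMerge, h, if_false, List.map_cons, List.sum_cons, ih, pvDigitSum]
        ring

theorem pv_wsum_rle (s : List Char) (h : s ≠ []) :
    pvWSum (pvRLE s) = pvSumaTotal s := by
  cases s with
  | nil => exact absurd rfl h
  | cons c t =>
      have h1 : pvWSum (pvRLE (c :: t)) =
          ((pvRLE (c :: t)).map (fun p => ((p.1.toNat : Int) - 48) * p.2)).sum := by
        simp [pvWSum, List.sum_eq_foldl, List.foldl_map]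
      have h2 : pvSumaTotal (c :: t) = pvDigitSum (c :: t) := by
        simp [pvSumaTotal, pvDigitSum, List.sum_eq_foldl, List.foldl_map]
      rw [h1, h2]
      simp only [pvRLE, pv_wsum_merge, pvDigitSum, List.map_cons, List.sum_cons]
      ring

theorem pvLoopA_ne_nil (k : Nat) : ∀ (s : List Char), s ≠ [] → pvLoopA k s ≠ [] := by
  induction k with
  | zero => intro s hs; exact hs
  | succ j ih =>
      intro s hs
      have hne : pvCount (pvSeparate s) ≠ [] := by
        rw [pv_stepA s hs]; exact pvExpand_rle_ne_nil s hs
      exact ih _ hne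

-- ===== VERDICT (by name: the statement is the Claim_ definition above) =====
theorem look_and_say_and_sum_spec : Claim_equal_look_and_say_and_sum := by
  intro n _
  unfold Spec_look_and_say_and_sum look_and_say_and_sum look_and_say_and_sum_alt
  split
  · have h1 : ([('1', 1)] : List (Char × Int)) = pvRLE ['1'] := rfl
    rw [h1, pv_loop _ ['1'] (by simp),
      pv_wsum_rle _ (pvLoopA_ne_nil _ ['1'] (by simp))]
  · rfl
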